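-- pv_equiv track=rewrite | github.com/SirArchy/CoMa-1 | Übung 0.py | evaluate_mul
-- ===== SOURCE A (Python) =====
-- def evaluate_mul(string_list): #WORKS
--     string_list = splitby(string_list, "*")
--
--     if len(string_list) == 1:
--         return string_list[0]
--
--     output = int(string_list[0])
--     string_list = string_list[1:]
--
--     while len(string_list) > 0:
--         operator = string_list[0]
--         number = int(string_list[1])
--         string_list = string_list[2:]
--         if operator == "*":
--             output *= number
--     return str(output)
--
-- def splitby(string, separator): #WORKS
--         lis = []
--         current_term = ""
--         for ch in string:
--             if ch in separator:
--                 lis.append(current_term)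
--                 lis.append(ch)
--                 current_term = ""
--             else:
--                 current_term += ch
--         lis.append(current_term)
--         return lis
-- ===== SOURCE B (Python) =====
-- def evaluate_mul(string_list):
--     parts = string_list.split("*")
--     if len(parts) == 1:
--         return string_list
--     product = 1
--     for part in parts:
--         product *= int(part)
--     return str(product)
-- ===== Notes on version B (the rewrite author's own statement) =====
-- stated objective: simpler
-- what changed: B drops the hand-rolled splitby helper that builds an interleaved term/separator token list by per-character string concatenation and the two-at-a-time operator/number while-loop, and instead splits on '*' once and folds a running product over the numeric parts.
import Mathlib
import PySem

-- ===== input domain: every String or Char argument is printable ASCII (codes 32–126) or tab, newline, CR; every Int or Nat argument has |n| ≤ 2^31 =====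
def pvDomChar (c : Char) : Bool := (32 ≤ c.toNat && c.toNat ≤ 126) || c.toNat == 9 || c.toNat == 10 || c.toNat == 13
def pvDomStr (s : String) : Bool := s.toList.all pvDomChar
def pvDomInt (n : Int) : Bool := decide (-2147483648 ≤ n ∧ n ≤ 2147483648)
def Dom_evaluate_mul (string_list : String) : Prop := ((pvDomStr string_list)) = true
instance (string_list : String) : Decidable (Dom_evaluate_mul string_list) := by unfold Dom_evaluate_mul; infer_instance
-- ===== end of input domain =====

-- B replaces A's interleaving splitter and operator/number stepping loop with a direct
-- split on '*' and a single product fold over the parts (objective: simpler).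

-- ===== PORT A =====
-- Python's `splitby(string, separator)`: a fold carrying (lis, current_term);
-- `ch in separator` for the one-character separator is membership among its characters (exact there).
def pySplitby (string : String) (separator : String) : List String :=
  let st := string.toList.foldl
    (fun (st : List String × List Char) ch =>
      if ch ∈ separator.toList then
        (st.1 ++ [String.ofList st.2, String.ofList [ch]], ([] : List Char))
      else
        (st.1, st.2 ++ [ch]))
    ([], [])
  st.1 ++ [String.ofList st.2]

-- A's while-loop: `string_list[1]` is read with headD and `int(...)` with getD 0; on inputs
-- admitted by Pre_ neither default is ever taken (Python raises exactly outside Pre_).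
def pyMulLoop : List String → Int → Int
  | [], output => output
  | operator :: rest, output =>
      let number := (PySem.Int.ofStr? (rest.headD "")).getD 0
      pyMulLoop (rest.drop 1) (if operator = "*" then output * number else output)
  termination_by l _ => l.length
  decreasing_by simp

def evaluate_mul (string_list : String) : String :=
  let l := pySplitby string_list "*"
  if l.length = 1 then l.headD ""
  else
    let output := (PySem.Int.ofStr? (l.headD "")).getD 0
    PySem.Int.toStr (pyMulLoop (l.drop 1) output)

-- ===== PORT B =====
def evaluate_mul_alt (string_list : String) : String :=
  let parts := (PySem.Chars.splitOn string_list.toList ['*']).map String.ofList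
  if parts.length = 1 then string_list
  else
    PySem.Int.toStr
      (parts.foldl (fun product part => product * (PySem.Int.ofStr? part).getD 0) 1)

-- ===== PRECONDITION & SPEC =====
-- Pre_ excludes exactly the inputs where Python A raises ValueError: strings containing '*'
-- in which some '*'-separated part is not a valid int literal (int() raises there).
def Pre_evaluate_mul (string_list : String) : Prop :=
  let parts := PySem.Chars.splitOn string_list.toList ['*']
  parts.length = 1 ∨ ∀ p ∈ parts, (PySem.Int.ofChars? p).isSome = true
instance (string_list : String) : Decidable (Pre_evaluate_mul string_list) := by
  unfold Pre_evaluate_mul; infer_instance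
def pvWitness_evaluate_mul : String := "2*3"

def Spec_evaluate_mul (string_list : String) (out : String) : Prop := out = evaluate_mul_alt string_list
instance (string_list : String) (out : String) : Decidable (Spec_evaluate_mul string_list out) := by unfold Spec_evaluate_mul; infer_instance

-- ===== CLAIM (what is proved, stated in full; the proofs are below) =====
def Claim_equal_evaluate_mul : Prop := ∀ (string_list : String), Dom_evaluate_mul string_list → Pre_evaluate_mul string_list → Spec_evaluate_mul string_list (evaluate_mul string_list)

-- ===== LEMMAS AND PROOFS =====

-- reference single-character splitter: `mySplit cs = cs.split('*')`
def mySplit : List Char → List (List Char)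
  | [] => [[]]
  | c :: cs => if c = '*' then [] :: mySplit cs
               else match mySplit cs with
                 | [] => [[c]]
                 | p :: ps => (c :: p) :: ps

theorem mySplit_ne_nil (cs : List Char) : mySplit cs ≠ [] := by
  induction cs with
  | nil => simp [mySplit]
  | cons c cs ih =>
    simp only [mySplit]
    split
    · simp
    · split <;> simp

theorem go_eq (fuel : Nat) (l cur : List Char) (acc : List (List Char))
    (h : l.length < fuel) :
    PySem.Chars.splitOn.go ['*'] fuel l cur acc =
      acc.reverse ++ (cur.reverse ++ (mySplit l).headI) :: (mySplit l).tail := by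
  induction fuel generalizing l cur acc with
  | zero => omega
  | succ fuel ih =>
    cases l with
    | nil => simp [PySem.Chars.splitOn.go, mySplit]
    | cons c rest =>
      rw [PySem.Chars.splitOn.go]
      by_cases hc : c = '*'
      · subst hc
        rw [if_pos (by simp : (['*'].isPrefixOf ('*' :: rest)) = true)]
        simp only [List.length_cons, List.drop_succ_cons, List.length_nil, List.drop_zero]
        rw [ih rest [] _ (by simp at h; omega)]
        rcases hp : mySplit rest with _ | ⟨p, ps⟩
        · exact absurd hp (mySplit_ne_nil rest)
        · simp [mySplit, hp]
      · have : (['*'].isPrefixOf (c :: rest)) = false := by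
          simp [List.isPrefixOf]; exact fun hh => hc hh.symm
        simp only [this, if_neg, Bool.false_eq_true, not_false_iff]
        rw [ih rest (c :: cur) acc (by simp at h ⊢; omega)]
        rcases hp : mySplit rest with _ | ⟨p, ps⟩
        · exact absurd hp (mySplit_ne_nil rest)
        · simp [mySplit, hc, hp]

theorem splitOn_star (l : List Char) :
    PySem.Chars.splitOn l ['*'] = mySplit l := by
  rw [PySem.Chars.splitOn, go_eq _ _ _ _ (by omega)]
  rcases hp : mySplit l with _ | ⟨p, ps⟩
  · exact absurd hp (mySplit_ne_nil l)
  · simp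

theorem mySplit_singleton (cs p : List Char) (h : mySplit cs = [p]) : p = cs := by
  induction cs generalizing p with
  | nil => simpa [mySplit, eq_comm] using h
  | cons c cs ih =>
    by_cases hc : c = '*'
    · subst hc
      have := mySplit_ne_nil cs
      simp [mySplit] at h
      rcases hm : mySplit cs with _ | ⟨q, qs⟩ <;> simp_all
    · rcases hm : mySplit cs with _ | ⟨q, qs⟩
      · exact absurd hm (mySplit_ne_nil cs)
      · simp [mySplit, hc, hm] at h
        rcases h with ⟨h1, h2⟩
        subst h2
        rw [← h1, ih q (by rw [hm])]

theorem splitby_fold (cs : List Char) (lis : List String) (cur : List Char) :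
    ((cs.foldl
        (fun (st : List String × List Char) ch =>
          if ch ∈ ("*" : String).toList then
            (st.1 ++ [String.ofList st.2, String.ofList [ch]], ([] : List Char))
          else
            (st.1, st.2 ++ [ch]))
        (lis, cur)).1 ++
      [String.ofList (cs.foldl
        (fun (st : List String × List Char) ch =>
          if ch ∈ ("*" : String).toList then
            (st.1 ++ [String.ofList st.2, String.ofList [ch]], ([] : List Char))
          else
            (st.1, st.2 ++ [ch]))
        (lis, cur)).2]) =
    lis ++ List.intersperse "*"
      (((cur ++ (mySplit cs).headI) :: (mySplit cs).tail).map String.ofList) := by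
  induction cs generalizing lis cur with
  | nil => simp [mySplit]
  | cons c cs ih =>
    by_cases hc : c = '*'
    · subst hc
      rcases hm : mySplit cs with _ | ⟨p, ps⟩
      · exact absurd hm (mySplit_ne_nil cs)
      · simp only [List.foldl_cons, if_pos (by decide : '*' ∈ ("*" : String).toList)]
        rw [ih]
        simp [mySplit, hm]
    · rcases hm : mySplit cs with _ | ⟨p, ps⟩
      · exact absurd hm (mySplit_ne_nil cs)
      · simp only [List.foldl_cons,
          if_neg (by simpa using fun hh => hc hh : ¬ c ∈ ("*" : String).toList)]
        rw [ih]
        simp [mySplit, hc, hm]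

theorem pySplitby_star (s : String) :
    pySplitby s "*" = List.intersperse "*" ((mySplit s.toList).map String.ofList) := by
  have := splitby_fold s.toList [] []
  rcases hm : mySplit s.toList with _ | ⟨p, ps⟩
  · exact absurd hm (mySplit_ne_nil s.toList)
  · simpa [pySplitby, hm] using this

theorem intersperse_cons_flatMap (sep : String) (p : String) (ps : List String) :
    List.intersperse sep (p :: ps) = p :: ps.flatMap (fun q => [sep, q]) := by
  induction ps generalizing p with
  | nil => simp
  | cons q qs ih => simp [List.intersperse, ih q]

theorem pyMulLoop_flatMap (qs : List String) (out : Int) :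
    pyMulLoop (qs.flatMap (fun q => [("*" : String), q])) out =
      qs.foldl (fun o q => o * (PySem.Int.ofStr? q).getD 0) out := by
  induction qs generalizing out with
  | nil => rw [pyMulLoop.eq_def]; simp
  | cons q qs ih =>
    simp only [List.flatMap_cons, List.cons_append, List.nil_append]
    rw [pyMulLoop.eq_def]
    simp [ih]

theorem eval_eq (s : String) : evaluate_mul s = evaluate_mul_alt s := by
  rcases hm : mySplit s.toList with _ | ⟨p, ps⟩
  · exact absurd hm (mySplit_ne_nil s.toList)
  · have hA : pySplitby s "*" = List.intersperse "*" ((p :: ps).map String.ofList) := by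
      rw [pySplitby_star, hm]
    have hB : PySem.Chars.splitOn s.toList ['*'] = p :: ps := by
      rw [splitOn_star, hm]
    cases ps with
    | nil =>
      have hp : p = s.toList := mySplit_singleton _ _ hm
      simp [evaluate_mul, evaluate_mul_alt, hA, hB, hp, String.ofList_toList]
    | cons q qs =>
      rw [evaluate_mul, evaluate_mul_alt]
      simp only [hA, hB, List.map_cons,
        intersperse_cons_flatMap "*" (String.ofList p) ((String.ofList q :: (qs.map String.ofList)))]
      have hlen : (String.ofList p :: (String.ofList q :: qs.map String.ofList).flatMap
          (fun q => [("*" : String), q])).length ≠ 1 := by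
        simp [List.length_flatMap]
      have hlen2 : (String.ofList p :: String.ofList q :: qs.map String.ofList).length ≠ 1 := by simp
      rw [if_neg hlen, if_neg hlen2]
      simp only [List.headD_cons, List.drop_one, List.tail_cons]
      rw [pyMulLoop_flatMap]
      simp

-- ===== VERDICT (by name: the statement is the Claim_ definition above) =====
theorem evaluate_mul_spec : Claim_equal_evaluate_mul := by
  intro s _ _
  unfold Spec_evaluate_mul
  exact eval_eq s
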